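-- pv_equiv track=rewrite | github.com/kosbarts/Commissioner | venv726/lib/python3.7/site-packages/defcon/objects/uniData.py | _sortByNotdef
-- ===== SOURCE A (Python) =====
-- def _sortByNotdef(glyphNames, ascending, allowPseudoUnicode):
--     notDef = []
--     notNotDef = []
--     for glyphName in glyphNames:
--         if glyphName.startswith(".notdef"):
--             notDef.append(glyphName)
--         else:
--             notNotDef.append(glyphName)
--     return notNotDef + notDef
-- ===== SOURCE B (Python) =====
-- def _sortByNotdef(glyphNames, ascending, allowPseudoUnicode):
--     return sorted(glyphNames, key=lambda n: n.startswith(".notdef"))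
-- ===== Notes on version B (the rewrite author's own statement) =====
-- stated objective: idiomatic
-- what changed: Replaces the explicit two-bucket partition loop with a single stable sort keyed on startswith('.notdef'); sort stability yields exactly notNotDef + notDef.
import Mathlib
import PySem

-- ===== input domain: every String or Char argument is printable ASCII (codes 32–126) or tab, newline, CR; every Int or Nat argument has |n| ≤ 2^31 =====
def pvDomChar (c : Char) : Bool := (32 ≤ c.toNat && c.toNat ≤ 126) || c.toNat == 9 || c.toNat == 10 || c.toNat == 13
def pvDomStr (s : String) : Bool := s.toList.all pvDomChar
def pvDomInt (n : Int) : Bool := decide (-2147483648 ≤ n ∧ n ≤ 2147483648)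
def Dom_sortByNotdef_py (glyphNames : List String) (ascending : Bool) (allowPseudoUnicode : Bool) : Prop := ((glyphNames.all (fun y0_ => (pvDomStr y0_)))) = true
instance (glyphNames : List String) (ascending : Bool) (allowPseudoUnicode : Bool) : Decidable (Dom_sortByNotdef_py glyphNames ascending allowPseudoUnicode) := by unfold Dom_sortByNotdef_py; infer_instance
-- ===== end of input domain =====

-- B replaces A's explicit two-bucket partition loop with a single stable sort keyed on
-- startswith(".notdef") (idiomatic; relies on sort stability for the ordering guarantee).


-- ===== PORT A =====
-- literal transliteration: two accumulator lists, appended in a single pass, then concatenated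
def sortByNotdef_py (glyphNames : List String) (ascending : Bool) (allowPseudoUnicode : Bool) : List String :=
  let st := glyphNames.foldl
    (fun (st : List String × List String) glyphName =>
      if PySem.Str.startswith glyphName ".notdef" then (st.1 ++ [glyphName], st.2)
      else (st.1, st.2 ++ [glyphName]))
    ([], [])
  st.2 ++ st.1

-- ===== PORT B =====
-- literal transliteration of Source B: sorted(glyphNames, key=lambda n: n.startswith(".notdef"))
-- (Python bool key sorts as 0/1)
def sortByNotdef_py_alt (glyphNames : List String) (ascending : Bool) (allowPseudoUnicode : Bool) : List String :=
  PySem.List.sorted glyphNames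
    (fun n => if PySem.Str.startswith n ".notdef" then (1 : Nat) else 0) false

-- ===== PRECONDITION & SPEC =====
def Spec_sortByNotdef_py (glyphNames : List String) (ascending : Bool) (allowPseudoUnicode : Bool) (out : List String) : Prop := out = sortByNotdef_py_alt glyphNames ascending allowPseudoUnicode
instance (glyphNames : List String) (ascending : Bool) (allowPseudoUnicode : Bool) (out : List String) : Decidable (Spec_sortByNotdef_py glyphNames ascending allowPseudoUnicode out) := by unfold Spec_sortByNotdef_py; infer_instance

-- ===== CLAIM (what is proved, stated in full; the proofs are below) =====
def Claim_equal_sortByNotdef_py : Prop := ∀ (glyphNames : List String) (ascending : Bool) (allowPseudoUnicode : Bool), Dom_sortByNotdef_py glyphNames ascending allowPseudoUnicode → Spec_sortByNotdef_py glyphNames ascending allowPseudoUnicode (sortByNotdef_py glyphNames ascending allowPseudoUnicode)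

-- ===== LEMMAS AND PROOFS =====

-- the predicate and the 0/1 sort key
def pvP (n : String) : Bool := PySem.Str.startswith n ".notdef"
def pvKey (n : String) : Nat := if pvP n then 1 else 0

-- A's loop computes (notDef ++ filter pvP, notNotDef ++ filter ¬pvP)
theorem pvA_foldl (xs : List String) (nd nnd : List String) :
    xs.foldl
      (fun (st : List String × List String) g =>
        if pvP g then (st.1 ++ [g], st.2) else (st.1, st.2 ++ [g])) (nd, nnd)
    = (nd ++ xs.filter pvP, nnd ++ xs.filter (fun g => !pvP g)) := by
  induction xs generalizing nd nnd with
  | nil => simp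
  | cons x xs ih =>
    simp only [List.foldl_cons, List.filter_cons]
    by_cases h : pvP x = true
    · simp only [h, if_pos rfl, Bool.not_true, ih]
      simp
    · simp only [Bool.not_eq_true] at h
      simp only [h, Bool.not_false, if_neg (Bool.false_ne_true), if_pos rfl, ih]
      simp

-- inserting a non-notdef element into a "zeros ++ ones" list lands right after the zeros
theorem pvInsert0 (x : String) (zs os : List String) (hx : pvP x = false)
    (hz : ∀ z ∈ zs, pvP z = false) (ho : ∀ o ∈ os, pvP o = true) :
    PySem.List.insertBy (fun a b => decide (pvKey a < pvKey b)) x (zs ++ os)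
    = zs ++ x :: os := by
  induction zs with
  | nil =>
    cases os with
    | nil => simp [PySem.List.insertBy]
    | cons o os =>
      have hko : pvP o = true := ho o (by simp)
      simp [PySem.List.insertBy, pvKey, hx, hko]
  | cons z zs ihz =>
    have hkz : pvP z = false := hz z (by simp)
    have hz' : ∀ z ∈ zs, pvP z = false := fun z h => hz z (by simp [h])
    have hb : (decide (pvKey x < pvKey z)) = false := by simp [pvKey, hkz]
    simp only [List.cons_append, PySem.List.insertBy, hb]
    rw [if_neg (Bool.false_ne_true), ihz hz']

-- inserting one element into a "zeros ++ ones" list keeps that shape, stably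
theorem pvInsert (x : String) (zs os : List String)
    (hz : ∀ z ∈ zs, pvP z = false) (ho : ∀ o ∈ os, pvP o = true) :
    PySem.List.insertBy (fun a b => decide (pvKey a < pvKey b)) x (zs ++ os)
    = if pvP x then zs ++ os ++ [x] else zs ++ x :: os := by
  by_cases hx : pvP x = true
  · rw [PySem.List.insertBy_of_forall_not_before]
    · simp [hx]
    · intro y _
      by_cases hy : pvP y = true <;> simp [pvKey, hx, hy]
  · simp only [Bool.not_eq_true] at hx
    rw [pvInsert0 x zs os hx hz ho, if_neg (by simp [hx])]

-- B's insertion sort with the 0/1 key computes filter ¬pvP ++ filter pvP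
theorem pvB_foldl (xs zs os : List String)
    (hz : ∀ z ∈ zs, pvP z = false) (ho : ∀ o ∈ os, pvP o = true) :
    xs.foldl (fun acc x =>
        PySem.List.insertBy (fun a b => decide (pvKey a < pvKey b)) x acc) (zs ++ os)
    = (zs ++ xs.filter (fun g => !pvP g)) ++ (os ++ xs.filter pvP) := by
  induction xs generalizing zs os with
  | nil => simp
  | cons x xs ih =>
    simp only [List.foldl_cons]
    rw [pvInsert x zs os hz ho]
    by_cases hx : pvP x = true
    · rw [if_pos hx, List.append_assoc zs os [x]]
      have ho' : ∀ o ∈ os ++ [x], pvP o = true := by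
        intro o hmem
        rcases List.mem_append.mp hmem with h | h
        · exact ho o h
        · simp at h; simp [h, hx]
      rw [ih zs (os ++ [x]) hz ho']
      simp [hx]
    · simp only [Bool.not_eq_true] at hx
      rw [if_neg (by simp [hx])]
      rw [show zs ++ x :: os = (zs ++ [x]) ++ os by simp]
      have hz' : ∀ z ∈ zs ++ [x], pvP z = false := by
        intro z hmem
        rcases List.mem_append.mp hmem with h | h
        · exact hz z h
        · simp at h; simp [h, hx]
      rw [ih (zs ++ [x]) os hz' ho]
      simp [hx]

-- ===== VERDICT (by name: the statement is the Claim_ definition above) =====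
theorem sortByNotdef_py_spec : Claim_equal_sortByNotdef_py := by
  intro glyphNames ascending allowPseudoUnicode _
  show sortByNotdef_py glyphNames ascending allowPseudoUnicode
      = sortByNotdef_py_alt glyphNames ascending allowPseudoUnicode
  unfold sortByNotdef_py sortByNotdef_py_alt
  rw [show (fun (st : List String × List String) glyphName =>
        if PySem.Str.startswith glyphName ".notdef" then (st.1 ++ [glyphName], st.2)
        else (st.1, st.2 ++ [glyphName]))
      = (fun (st : List String × List String) g =>
        if pvP g then (st.1 ++ [g], st.2) else (st.1, st.2 ++ [g])) from rfl]
  rw [show (fun n : String => if PySem.Str.startswith n ".notdef" then (1 : Nat) else 0)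
      = pvKey from rfl]
  rw [PySem.List.sorted_eq_foldl_insertBy]
  rw [pvA_foldl glyphNames [] []]
  have hb := pvB_foldl glyphNames [] [] (by simp) (by simp)
  simp only [List.nil_append] at hb ⊢
  rw [hb]
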